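-- pv_equiv track=rewrite | github.com/palexayo/divideAndConquer | SubArray.py | getListLeftRightBorderMax
-- ===== SOURCE A (Python) =====
-- def getListLeftRightBorderMax(list, splitSize):
--     rightBorderMax = 0
--     sum = 0
--
--     for i in range(splitSize - 1, -1, -1):
--         sum += list[i]
--         if rightBorderMax < sum:
--             rightBorderMax = sum
--     return rightBorderMax
-- ===== SOURCE B (Python) =====
-- def getListLeftRightBorderMax(list, splitSize):
--     # Forward prefix-complement scan: best suffix sum of the first splitSize
--     # elements is total minus the smallest prefix sum seen so far, floored at 0.
--     n = splitSize if splitSize > 0 else 0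
--     head = list[:n]
--     total = sum(head)
--     best = 0
--     prefix = 0
--     for x in head:
--         cand = total - prefix
--         if cand > best:
--             best = cand
--         prefix += x
--     return best
-- ===== Notes on version B (the rewrite author's own statement) =====
-- stated objective: alternative
-- what changed: Replaces A's backward suffix accumulation (indexing list[i] for i = splitSize-1 down to 0 while tracking the running suffix sum's max) with a forward prefix-complement scan over the sliced prefix: compute total = sum(list[:splitSize]) once, then walk forward maintaining a running prefix sum and take the max of total - prefix, floored at 0.
import Mathlib
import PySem

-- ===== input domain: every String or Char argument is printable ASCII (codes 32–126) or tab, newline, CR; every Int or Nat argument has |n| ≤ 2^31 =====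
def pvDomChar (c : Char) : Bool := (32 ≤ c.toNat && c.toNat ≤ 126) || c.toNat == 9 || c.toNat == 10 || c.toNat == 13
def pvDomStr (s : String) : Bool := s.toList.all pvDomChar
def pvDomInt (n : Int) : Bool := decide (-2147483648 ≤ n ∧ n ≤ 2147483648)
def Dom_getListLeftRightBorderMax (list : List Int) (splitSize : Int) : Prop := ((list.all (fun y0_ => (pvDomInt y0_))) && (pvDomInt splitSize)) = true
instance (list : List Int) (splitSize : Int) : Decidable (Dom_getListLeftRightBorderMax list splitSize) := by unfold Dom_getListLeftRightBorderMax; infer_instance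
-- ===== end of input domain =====

-- B replaces A's backward suffix accumulation by a forward prefix-complement scan
-- over the sliced prefix (same cost, different decomposition).

-- ===== PORT A =====
-- loop body of A: sum += list[i]; if rightBorderMax < sum: rightBorderMax = sum
def pvStepA (list : List Int) (st : Int × Int) (i : Int) : Int × Int :=
  let s := st.2 + PySem.List.pyGetD list i 0
  (if st.1 < s then s else st.1, s)

def getListLeftRightBorderMax (list : List Int) (splitSize : Int) : Int :=
  ((PySem.List.pyRange (splitSize - 1) (-1) (-1)).foldl (pvStepA list) (0, 0)).1

-- ===== PORT B =====
-- loop body of B: cand = total - prefix; if cand > best: best = cand; prefix += x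
def pvStepB (total : Int) (st : Int × Int) (x : Int) : Int × Int :=
  let cand := total - st.2
  (if st.1 < cand then cand else st.1, st.2 + x)

def getListLeftRightBorderMax_alt (list : List Int) (splitSize : Int) : Int :=
  let n : Int := if 0 < splitSize then splitSize else 0
  let head := PySem.List.slice list none (some n)
  let total := head.foldl (fun acc x => acc + x) 0
  (head.foldl (pvStepB total) (0, 0)).1

-- ===== PRECONDITION & SPEC =====
-- Pre_ excludes exactly the inputs where A raises IndexError (splitSize > len(list)).
def Pre_getListLeftRightBorderMax (list : List Int) (splitSize : Int) : Prop :=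
  splitSize ≤ (list.length : Int)
instance (list : List Int) (splitSize : Int) : Decidable (Pre_getListLeftRightBorderMax list splitSize) := by unfold Pre_getListLeftRightBorderMax; infer_instance

def pvWitness_getListLeftRightBorderMax : List Int × Int := ([1, -2, 3], 2)

def Spec_getListLeftRightBorderMax (list : List Int) (splitSize : Int) (out : Int) : Prop := out = getListLeftRightBorderMax_alt list splitSize
instance (list : List Int) (splitSize : Int) (out : Int) : Decidable (Spec_getListLeftRightBorderMax list splitSize out) := by unfold Spec_getListLeftRightBorderMax; infer_instance

-- ===== CLAIM (what is proved, stated in full; the proofs are below) =====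
def Claim_equal_getListLeftRightBorderMax : Prop := ∀ (list : List Int) (splitSize : Int), Dom_getListLeftRightBorderMax list splitSize → Pre_getListLeftRightBorderMax list splitSize → Spec_getListLeftRightBorderMax list splitSize (getListLeftRightBorderMax list splitSize)


-- ===== LEMMAS AND PROOFS =====

-- A's loop body applied to the element itself (indexing resolved).
def pvStepA' (st : Int × Int) (x : Int) : Int × Int :=
  let s := st.2 + x
  (if st.1 < s then s else st.1, s)

-- max of b and all nonempty-suffix sums of t
def pvNmax : List Int → Int → Int
  | [], b => b
  | x :: t, b => pvNmax t (max b (x + t.sum))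

lemma pvNmax_max (t : List Int) : ∀ b c, pvNmax t (max b c) = max (pvNmax t b) c := by
  induction t with
  | nil => intro b c; rfl
  | cons x t ih =>
      intro b c
      show pvNmax t (max (max b c) (x + t.sum)) = max (pvNmax t (max b (x + t.sum))) c
      have h : max (max b c) (x + t.sum) = max (max b (x + t.sum)) c := by omega
      rw [h, ih]

lemma pv_bridgeA (list : List Int) : ∀ (m : Nat), m ≤ list.length → ∀ st,
    (PySem.List.pyRange ((m : Int) - 1) (-1) (-1)).foldl (pvStepA list) st
      = ((list.take m).reverse).foldl pvStepA' st := by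
  intro m
  induction m with
  | zero =>
      intro _ st
      rw [PySem.List.pyRange_neg_one_eq_nil (by norm_num)]
      simp
  | succ m ih =>
      intro hm st
      have hm' : m < list.length := by omega
      have hcons : PySem.List.pyRange (((m : Nat) + 1 : Int) - 1) (-1) (-1)
          = (m : Int) :: PySem.List.pyRange ((m : Int) - 1) (-1) (-1) := by
        have := PySem.List.pyRange_neg_one_cons (a := ((m : Nat) + 1 : Int) - 1) (b := (-1)) (by omega)
        simpa using this
      have htake : (list.take (m + 1)).reverse = list[m] :: (list.take m).reverse := by
        rw [List.take_add_one]
        simp [hm']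
      push_cast at hcons ⊢
      rw [hcons, htake]
      simp only [List.foldl_cons]
      have hstep : pvStepA list st (m : Int) = pvStepA' st list[m] := by
        simp [pvStepA, pvStepA', List.getD, hm']
      rw [hstep, ih (by omega)]

lemma pv_Achar (t : List Int) : (t.reverse).foldl pvStepA' (0, 0) = (pvNmax t 0, t.sum) := by
  induction t with
  | nil => rfl
  | cons x t ih =>
      have : (x :: t).reverse = t.reverse ++ [x] := by simp
      rw [this, List.foldl_append, ih]
      show pvStepA' (pvNmax t 0, t.sum) x = (pvNmax (x :: t) 0, (x :: t).sum)
      have h1 : pvNmax (x :: t) 0 = max (pvNmax t 0) (x + t.sum) := by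
        show pvNmax t (max 0 (x + t.sum)) = _
        rw [pvNmax_max]
      simp only [pvStepA', List.sum_cons, h1, Prod.mk.injEq]
      exact ⟨by split_ifs <;> omega, by omega⟩

lemma pv_Bchar (total : Int) : ∀ (t : List Int) (p b : Int), total = p + t.sum →
    ((t.foldl (pvStepB total) (b, p)).1 = pvNmax t b) := by
  intro t
  induction t with
  | nil => intro p b _; rfl
  | cons x t ih =>
      intro p b h
      simp only [List.foldl_cons]
      have hb : pvStepB total (b, p) x = (max b (x + t.sum), p + x) := by
        have ht : total - p = x + t.sum := by simp [List.sum_cons] at h; omega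
        simp only [pvStepB, Prod.mk.injEq]
        exact ⟨by rw [ht]; split_ifs <;> omega, trivial⟩
      rw [hb]
      exact ih (p + x) _ (by simp [List.sum_cons] at h; omega)

lemma pv_alt_eq (list : List Int) (n : Int) :
    getListLeftRightBorderMax_alt list n = pvNmax (list.take n.toNat) 0 := by
  have hslice : PySem.List.slice list none (some (if 0 < n then n else 0)) = list.take n.toNat := by
    by_cases h : 0 < n
    · simp only [h, if_true]
      exact PySem.List.slice_to list (le_of_lt h)
    · simp only [h, if_false]
      rw [PySem.List.slice_to list (le_refl (0 : Int))]
      have : n.toNat = 0 := by omega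
      simp [this]
  simp only [getListLeftRightBorderMax_alt]
  rw [hslice]
  have hsum : (list.take n.toNat).foldl (fun acc x => acc + x) 0 = (list.take n.toNat).sum := by
    rw [List.sum_eq_foldl]
  rw [hsum]
  exact pv_Bchar _ _ 0 0 (by simp)

-- ===== VERDICT (by name: the statement is the Claim_ definition above) =====
theorem getListLeftRightBorderMax_spec : Claim_equal_getListLeftRightBorderMax := by
  intro list n _ hpre
  unfold Spec_getListLeftRightBorderMax
  rw [pv_alt_eq]
  unfold getListLeftRightBorderMax
  by_cases h0 : 0 ≤ n
  · have hcast : (n.toNat : Int) = n := Int.toNat_of_nonneg h0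
    have hm : n.toNat ≤ list.length := by
      unfold Pre_getListLeftRightBorderMax at hpre; omega
    rw [show n - 1 = (n.toNat : Int) - 1 by omega, pv_bridgeA list n.toNat hm, pv_Achar]
  · rw [PySem.List.pyRange_neg_one_eq_nil (by omega)]
    have : n.toNat = 0 := by omega
    simp [this, pvNmax]
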